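-- pv_equiv track=rewrite | github.com/ablagovestnov/compose-reconciler | src/state.py | diff_action
-- ===== SOURCE A (Python) =====
-- def diff_action(current: dict, applied: dict) -> str | None:
--     """Minimal rebuild hint based on which subdirs changed. None = no change."""
--     if not applied:
--         return None
--     changed = {k for k in current if current.get(k) != applied.get(k)}
--     if not changed:
--         return None
--     if "compose" in changed or "env" in changed:
--         return "full"
--     if "backend" in changed:
--         return "backend"
--     if "bot" in changed:
--         return "bot"
--     if "site" in changed:
--         return "site"
--     return "full"
-- ===== SOURCE B (Python) =====
-- _TABLE = {
--     "compose": (0, "full"),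
--     "env": (0, "full"),
--     "backend": (1, "backend"),
--     "bot": (2, "bot"),
--     "site": (3, "site"),
-- }
--
--
-- def diff_action(current: dict, applied: dict) -> str | None:
--     """Minimal rebuild hint based on which subdirs changed. None = no change."""
--     if not applied:
--         return None
--     changed = {k for k in current if current.get(k) != applied.get(k)}
--     best = None
--     for k in changed:
--         entry = _TABLE.get(k, (4, "full"))
--         if best is None or entry[0] < best[0]:
--             best = entry
--     return best[1] if best is not None else None
-- ===== Notes on version B (the rewrite author's own statement) =====
-- stated objective: alternative
-- what changed: replaces A's hard-coded membership if-chain over the changed set by a (priority, action) table and a single minimum-priority scan of the changed keys (unknown keys rank below 'site')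
import Mathlib
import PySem

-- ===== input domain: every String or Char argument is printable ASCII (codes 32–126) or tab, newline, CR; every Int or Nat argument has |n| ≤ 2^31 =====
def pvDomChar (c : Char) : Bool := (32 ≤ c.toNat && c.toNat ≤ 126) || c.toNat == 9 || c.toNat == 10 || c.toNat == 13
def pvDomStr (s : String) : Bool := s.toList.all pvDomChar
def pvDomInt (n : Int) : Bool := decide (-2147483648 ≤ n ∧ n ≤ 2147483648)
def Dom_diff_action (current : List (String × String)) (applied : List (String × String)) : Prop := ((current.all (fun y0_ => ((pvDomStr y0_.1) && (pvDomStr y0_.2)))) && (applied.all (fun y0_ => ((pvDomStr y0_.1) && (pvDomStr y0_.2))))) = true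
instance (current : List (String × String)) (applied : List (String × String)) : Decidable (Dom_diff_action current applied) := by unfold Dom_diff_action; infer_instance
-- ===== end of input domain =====

-- B replaces A's membership if-chain over the changed set by a (priority, action)
-- table and a single minimum-priority scan; same return values everywhere (alternative decomposition, not faster).

-- ===== PORT A =====
-- the set comprehension {k for k in current if current.get(k) != applied.get(k)}
def pvChanged (current : List (String × String)) (applied : List (String × String)) : PySem.Set String :=
  PySem.Set.ofList ((current.map Prod.fst).filter (fun k =>
    (PySem.Dict.mk current).get? k != (PySem.Dict.mk applied).get? k))

def diff_action (current : List (String × String)) (applied : List (String × String)) : Option String :=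
  if applied.isEmpty then none
  else
    if (pvChanged current applied).isEmpty then none
    else if PySem.Set.contains (pvChanged current applied) "compose" || PySem.Set.contains (pvChanged current applied) "env" then some "full"
    else if PySem.Set.contains (pvChanged current applied) "backend" then some "backend"
    else if PySem.Set.contains (pvChanged current applied) "bot" then some "bot"
    else if PySem.Set.contains (pvChanged current applied) "site" then some "site"
    else some "full"

-- ===== PORT B =====
-- _TABLE in Source B
def pvTable : PySem.Dict String (Int × String) :=
  PySem.Dict.mk [("compose", (0, "full")), ("env", (0, "full")),
                 ("backend", (1, "backend")), ("bot", (2, "bot")), ("site", (3, "site"))]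

-- body of Source B's for-loop: keep the entry with the smallest priority seen
def pvStep (best : Option (Int × String)) (k : String) : Option (Int × String) :=
  let entry := pvTable.getD k (4, "full")
  match best with
  | none => some entry
  | some b => if entry.1 < b.1 then some entry else some b

def diff_action_alt (current : List (String × String)) (applied : List (String × String)) : Option String :=
  if applied.isEmpty then none
  else
    match (pvChanged current applied).foldl pvStep none with
    | none => none
    | some b => some b.2

-- ===== PRECONDITION & SPEC =====
def Spec_diff_action (current : List (String × String)) (applied : List (String × String)) (out : Option String) : Prop := out = diff_action_alt current applied
instance (current : List (String × String)) (applied : List (String × String)) (out : Option String) : Decidable (Spec_diff_action current applied out) := by unfold Spec_diff_action; infer_instance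

-- ===== CLAIM (what is proved, stated in full; the proofs are below) =====
def Claim_equal_diff_action : Prop := ∀ (current : List (String × String)) (applied : List (String × String)), Dom_diff_action current applied → Spec_diff_action current applied (diff_action current applied)

-- ===== LEMMAS AND PROOFS =====

-- priority of a key in pvTable (4 for unknown keys) and the action attached to each priority
def pvRank (k : String) : Int :=
  if k = "compose" then 0 else if k = "env" then 0 else if k = "backend" then 1
  else if k = "bot" then 2 else if k = "site" then 3 else 4

def pvAct (r : Int) : String :=
  if r = 0 then "full" else if r = 1 then "backend" else if r = 2 then "bot"
  else if r = 3 then "site" else "full"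

theorem pvTable_getD (k : String) : pvTable.getD k (4, "full") = (pvRank k, pvAct (pvRank k)) := by
  by_cases h1 : k = "compose"
  · subst h1; decide
  by_cases h2 : k = "env"
  · subst h2; decide
  by_cases h3 : k = "backend"
  · subst h3; decide
  by_cases h4 : k = "bot"
  · subst h4; decide
  by_cases h5 : k = "site"
  · subst h5; decide
  have e1 : (("compose" : String) == k) = false := beq_eq_false_iff_ne.2 (Ne.symm h1)
  have e2 : (("env" : String) == k) = false := beq_eq_false_iff_ne.2 (Ne.symm h2)
  have e3 : (("backend" : String) == k) = false := beq_eq_false_iff_ne.2 (Ne.symm h3)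
  have e4 : (("bot" : String) == k) = false := beq_eq_false_iff_ne.2 (Ne.symm h4)
  have e5 : (("site" : String) == k) = false := beq_eq_false_iff_ne.2 (Ne.symm h5)
  simp [pvTable, PySem.Dict.getD, PySem.Dict.get?, List.find?, pvRank, pvAct,
    e1, e2, e3, e4, e5, h1, h2, h3, h4, h5]

theorem pvRank_nonneg (k : String) : 0 ≤ pvRank k := by
  unfold pvRank; split_ifs <;> norm_num

theorem pvRank_le (k : String) : pvRank k ≤ 4 := by
  unfold pvRank; split_ifs <;> norm_num

theorem pvRank_eq_zero_iff (k : String) : pvRank k = 0 ↔ (k = "compose" ∨ k = "env") := by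
  unfold pvRank; split_ifs <;> simp_all

theorem pvRank_eq_one_iff (k : String) : pvRank k = 1 ↔ k = "backend" := by
  unfold pvRank; split_ifs <;> simp_all

theorem pvRank_eq_two_iff (k : String) : pvRank k = 2 ↔ k = "bot" := by
  unfold pvRank; split_ifs <;> simp_all

theorem pvRank_eq_three_iff (k : String) : pvRank k = 3 ↔ k = "site" := by
  unfold pvRank; split_ifs <;> simp_all

-- minimum rank over a list, with initial value a
def pvMin (L : List String) (a : Int) : Int := L.foldl (fun m k => min m (pvRank k)) a

theorem pvMin_cons (x : String) (L : List String) (a : Int) :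
    pvMin (x :: L) a = pvMin L (min a (pvRank x)) := rfl

theorem pvMin_le_init (L : List String) (a : Int) : pvMin L a ≤ a := by
  induction L generalizing a with
  | nil => simp [pvMin]
  | cons k L ih =>
    rw [pvMin_cons]
    exact (ih _).trans (min_le_left _ _)

theorem pvMin_le_of_mem (L : List String) (a : Int) (k : String) (hk : k ∈ L) :
    pvMin L a ≤ pvRank k := by
  induction L generalizing a with
  | nil => simp at hk
  | cons x L ih =>
    rw [pvMin_cons]
    rcases List.mem_cons.1 hk with rfl | hk
    · exact (pvMin_le_init L _).trans (min_le_right _ _)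
    · exact ih _ hk

theorem pvMin_attained (L : List String) (a : Int) :
    pvMin L a = a ∨ ∃ k ∈ L, pvMin L a = pvRank k := by
  induction L generalizing a with
  | nil => left; simp [pvMin]
  | cons x L ih =>
    rw [pvMin_cons]
    rcases ih (min a (pvRank x)) with h | ⟨k, hk, h⟩
    · by_cases hle : a ≤ pvRank x
      · left; rw [h]; exact min_eq_left hle
      · right; exact ⟨x, List.mem_cons_self, by rw [h]; exact min_eq_right (le_of_not_ge hle)⟩
    · right; exact ⟨k, List.mem_cons_of_mem _ hk, h⟩

theorem pvMin_nonneg (L : List String) (a : Int) (ha : 0 ≤ a) : 0 ≤ pvMin L a := by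
  rcases pvMin_attained L a with h | ⟨k, _, h⟩
  · omega
  · rw [h]; exact pvRank_nonneg k

-- the fold in B, started from a consistent state, computes the minimum rank and its action
theorem pvFold_some (L : List String) (r : Int) :
    L.foldl pvStep (some (r, pvAct r)) = some (pvMin L r, pvAct (pvMin L r)) := by
  induction L generalizing r with
  | nil => simp [pvMin]
  | cons k L ih =>
    rw [pvMin_cons]
    simp only [List.foldl_cons]
    rw [← ih (min r (pvRank k))]
    congr 1
    simp only [pvStep, pvTable_getD]
    split_ifs with h
    · have hm : min r (pvRank k) = pvRank k := min_eq_right h.le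
      rw [hm]
    · have hm : min r (pvRank k) = r := min_eq_left (le_of_not_gt h)
      rw [hm]

theorem pvFold_cons (k : String) (L : List String) :
    (k :: L).foldl pvStep none =
      some (pvMin L (pvRank k), pvAct (pvMin L (pvRank k))) := by
  have h : pvStep none k = some (pvRank k, pvAct (pvRank k)) := by
    simp [pvStep, pvTable_getD]
  simp only [List.foldl_cons, h, pvFold_some]

-- the core: A's if-chain over any nonempty key list equals B's min-priority scan
theorem pv_chain_eq_fold (L : List String) (hne : L ≠ []) :
    (if PySem.Set.contains L "compose" || PySem.Set.contains L "env" then some "full"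
     else if PySem.Set.contains L "backend" then some "backend"
     else if PySem.Set.contains L "bot" then some "bot"
     else if PySem.Set.contains L "site" then some "site"
     else some "full")
    = (match L.foldl pvStep none with
       | none => none
       | some b => some b.2) := by
  obtain ⟨k, L', rfl⟩ : ∃ k L', L = k :: L' := by
    cases L with
    | nil => exact absurd rfl hne
    | cons k L' => exact ⟨k, L', rfl⟩
  rw [pvFold_cons]
  obtain ⟨M, hM⟩ : ∃ M, M = pvMin L' (pvRank k) := ⟨_, rfl⟩
  rw [← hM]
  have hM_nonneg : 0 ≤ M := by rw [hM]; exact pvMin_nonneg _ _ (pvRank_nonneg k)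
  have hM_le : ∀ j, j ∈ (k :: L') → M ≤ pvRank j := by
    intro j hj
    rw [hM]
    rcases List.mem_cons.1 hj with rfl | hj
    · exact pvMin_le_init _ _
    · exact pvMin_le_of_mem _ _ _ hj
  have hM_att : ∃ j ∈ (k :: L'), M = pvRank j := by
    rw [hM]
    rcases pvMin_attained L' (pvRank k) with h | ⟨j, hj, h⟩
    · exact ⟨k, List.mem_cons_self, h⟩
    · exact ⟨j, List.mem_cons_of_mem _ hj, h⟩
  by_cases h0c : ("compose" : String) ∈ k :: L'
  · have hle : M ≤ 0 := by
      have h' := hM_le _ h0c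
      have hr : pvRank "compose" = 0 := by decide
      rw [hr] at h'
      exact h'
    have hM0 : M = 0 := le_antisymm hle hM_nonneg
    simp [PySem.Set.contains, List.contains_eq_mem, h0c, hM0, pvAct]
  by_cases h0e : ("env" : String) ∈ k :: L'
  · have hle : M ≤ 0 := by
      have h' := hM_le _ h0e
      have hr : pvRank "env" = 0 := by decide
      rw [hr] at h'
      exact h'
    have hM0 : M = 0 := le_antisymm hle hM_nonneg
    simp [PySem.Set.contains, List.contains_eq_mem, h0e, hM0, pvAct]
  have hne0 : M ≠ 0 := by
    intro hM0
    obtain ⟨j, hj, hjr⟩ := hM_att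
    have hz : pvRank j = 0 := by rw [← hjr]; exact hM0
    rcases (pvRank_eq_zero_iff j).1 hz with rfl | rfl
    · exact h0c hj
    · exact h0e hj
  by_cases h1 : ("backend" : String) ∈ k :: L'
  · have hle : M ≤ 1 := by
      have h' := hM_le _ h1
      have hr : pvRank "backend" = 1 := by decide
      rw [hr] at h'
      exact h'
    have hM1 : M = 1 := by omega
    simp [PySem.Set.contains, List.contains_eq_mem, h0c, h0e, h1, hM1, pvAct]
  have hne1 : M ≠ 1 := by
    intro hM1
    obtain ⟨j, hj, hjr⟩ := hM_att
    have hz : pvRank j = 1 := by rw [← hjr]; exact hM1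
    rw [(pvRank_eq_one_iff j).1 hz] at hj
    exact h1 hj
  by_cases h2 : ("bot" : String) ∈ k :: L'
  · have hle : M ≤ 2 := by
      have h' := hM_le _ h2
      have hr : pvRank "bot" = 2 := by decide
      rw [hr] at h'
      exact h'
    have hM2 : M = 2 := by omega
    simp [PySem.Set.contains, List.contains_eq_mem, h0c, h0e, h1, h2, hM2, pvAct]
  have hne2 : M ≠ 2 := by
    intro hM2
    obtain ⟨j, hj, hjr⟩ := hM_att
    have hz : pvRank j = 2 := by rw [← hjr]; exact hM2
    rw [(pvRank_eq_two_iff j).1 hz] at hj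
    exact h2 hj
  by_cases h3 : ("site" : String) ∈ k :: L'
  · have hle : M ≤ 3 := by
      have h' := hM_le _ h3
      have hr : pvRank "site" = 3 := by decide
      rw [hr] at h'
      exact h'
    have hM3 : M = 3 := by omega
    simp [PySem.Set.contains, List.contains_eq_mem, h0c, h0e, h1, h2, h3, hM3, pvAct]
  have hne3 : M ≠ 3 := by
    intro hM3
    obtain ⟨j, hj, hjr⟩ := hM_att
    have hz : pvRank j = 3 := by rw [← hjr]; exact hM3
    rw [(pvRank_eq_three_iff j).1 hz] at hj
    exact h3 hj
  have hM4 : M = 4 := by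
    obtain ⟨j, hj, hjr⟩ := hM_att
    have h4' : M ≤ 4 := by rw [hjr]; exact pvRank_le j
    omega
  simp [PySem.Set.contains, List.contains_eq_mem, h0c, h0e, h1, h2, h3, hM4, pvAct]

-- ===== VERDICT (by name: the statement is the Claim_ definition above) =====
theorem diff_action_spec : Claim_equal_diff_action := by
  intro current applied _dom
  unfold Spec_diff_action diff_action diff_action_alt
  by_cases ha : applied.isEmpty
  · rw [if_pos ha, if_pos ha]
  · rw [if_neg ha, if_neg ha]
    by_cases hc : (pvChanged current applied).isEmpty
    · have hnil : pvChanged current applied = [] := by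
        simpa [List.isEmpty_iff] using hc
      rw [if_pos hc, hnil]
      rfl
    · have hne : pvChanged current applied ≠ [] := by
        simpa [List.isEmpty_iff] using hc
      rw [if_neg hc]
      exact pv_chain_eq_fold _ hne
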